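-- pv_equiv track=rewrite | github.com/ut42/kya_khana_hai | services/tag_parser.py | _resolve_to_valid_tags
-- ===== SOURCE A (Python) =====
-- from typing import Dict, List, Optional, Tuple
--
-- def _normalize_tag(tag: str) -> str:
--     """Canonical form for matching: strip and replace spaces with underscores."""
--     return str(tag).strip().replace(" ", "_")
--
-- def _resolve_to_valid_tags(candidates: List[str], valid: set) -> List[str]:
--     """Return only tags that exist in valid, using normalized form for matching."""
--     seen = set()
--     result = []
--     for t in candidates:
--         nt = _normalize_tag(t)
--         if nt in valid and nt not in seen:
--             result.append(nt)
--             seen.add(nt)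
--     return result
-- ===== SOURCE B (Python) =====
-- def _normalize_tag(tag: str) -> str:
--     """Canonical form for matching: strip and replace spaces with underscores."""
--     return str(tag).strip().replace(" ", "_")
--
-- def _resolve_to_valid_tags(candidates, valid):
--     """Right-to-left fold: build the result back-to-front, prepending each valid
--     normalized tag after deleting its later duplicates from the result built so
--     far. No seen-set is maintained."""
--     result = []
--     for t in reversed(candidates):
--         nt = _normalize_tag(t)
--         if nt in valid:
--             result = [nt] + [x for x in result if x != nt]
--     return result
-- ===== Notes on version B (the rewrite author's own statement) =====
-- stated objective: alternative
-- what changed: Replaces A's forward loop with a seen-set accumulator by a right-to-left fold that builds the result back-to-front, prepending each valid normalized tag and deleting its later duplicates from the accumulated result, so no auxiliary seen structure exists.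
import Mathlib
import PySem

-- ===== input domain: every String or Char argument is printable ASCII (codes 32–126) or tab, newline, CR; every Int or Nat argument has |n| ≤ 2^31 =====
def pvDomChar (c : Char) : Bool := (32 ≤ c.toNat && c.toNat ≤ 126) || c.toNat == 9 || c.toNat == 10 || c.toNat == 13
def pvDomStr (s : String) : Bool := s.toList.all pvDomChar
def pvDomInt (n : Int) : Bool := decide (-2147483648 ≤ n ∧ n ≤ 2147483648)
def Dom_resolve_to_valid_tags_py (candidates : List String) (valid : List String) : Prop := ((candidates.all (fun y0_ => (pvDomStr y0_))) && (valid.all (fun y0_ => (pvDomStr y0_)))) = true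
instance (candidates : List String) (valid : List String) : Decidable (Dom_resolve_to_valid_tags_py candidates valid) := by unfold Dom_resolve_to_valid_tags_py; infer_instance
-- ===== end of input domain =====

-- B replaces A's seen-set loop by a head-first recursion that removes later duplicates from the tail's result (alternative algorithm, no seen structure; return-value equivalence).


-- ===== PORT A =====
-- _normalize_tag: str(tag).strip().replace(" ", "_")  (shared helper of both Pythons)
def normalize_tag (tag : String) : String :=
  PySem.Str.replace (PySem.Str.strip tag) " " "_"

def resolve_to_valid_tags_py (candidates : List String) (valid : List String) : List String :=
  (candidates.foldl
    (fun (st : PySem.Set String × List String) t =>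
      let nt := normalize_tag t
      if PySem.Set.contains valid nt && !(PySem.Set.contains st.1 nt) then
        (PySem.Set.add st.1 nt, st.2 ++ [nt])
      else st)
    (PySem.Set.empty, [])).2

-- ===== PORT B =====
-- right-to-left fold over the candidates: prepend each valid normalized tag
-- after deleting its later duplicates from the result built so far
def resolve_to_valid_tags_py_alt (candidates : List String) (valid : List String) : List String :=
  candidates.reverse.foldl
    (fun (result : List String) t =>
      let nt := normalize_tag t
      if PySem.Set.contains valid nt then nt :: result.filter (fun x => x ≠ nt)
      else result)
    []

-- ===== PRECONDITION & SPEC =====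
def Spec_resolve_to_valid_tags_py (candidates : List String) (valid : List String) (out : List String) : Prop := out = resolve_to_valid_tags_py_alt candidates valid
instance (candidates : List String) (valid : List String) (out : List String) : Decidable (Spec_resolve_to_valid_tags_py candidates valid out) := by unfold Spec_resolve_to_valid_tags_py; infer_instance

-- ===== CLAIM (what is proved, stated in full; the proofs are below) =====
def Claim_equal_resolve_to_valid_tags_py : Prop := ∀ (candidates : List String) (valid : List String), Dom_resolve_to_valid_tags_py candidates valid → Spec_resolve_to_valid_tags_py candidates valid (resolve_to_valid_tags_py candidates valid)

-- ===== LEMMAS AND PROOFS =====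

-- A's loop, abstracted to the list of normalized tags with the seen-list as explicit state.
def goA (valid : List String) : List String → List String → List String
  | [], _ => []
  | nt :: ns, seen =>
      if PySem.Set.contains valid nt && !(PySem.Set.contains seen nt) then
        nt :: goA valid ns (seen ++ [nt])
      else goA valid ns seen

-- B's recursion, abstracted to the list of normalized tags.
def goB (valid : List String) : List String → List String
  | [] => []
  | nt :: ns =>
      if !(PySem.Set.contains valid nt) then goB valid ns
      else nt :: (goB valid ns).filter (fun x => x ≠ nt)

lemma foldlA_eq_goA (valid : List String) (cs : List String)
    (seen acc : List String) :
    (cs.foldl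
      (fun (st : PySem.Set String × List String) t =>
        let nt := normalize_tag t
        if PySem.Set.contains valid nt && !(PySem.Set.contains st.1 nt) then
          (PySem.Set.add st.1 nt, st.2 ++ [nt])
        else st)
      (seen, acc)).2 = acc ++ goA valid (cs.map normalize_tag) seen := by
  induction cs generalizing seen acc with
  | nil => simp [goA]
  | cons t cs ih =>
      simp only [List.foldl_cons, List.map_cons, goA]
      by_cases h : (PySem.Set.contains valid (normalize_tag t)
          && !(PySem.Set.contains seen (normalize_tag t))) = true
      · simp only [h, if_pos]
        rw [ih]
        have hadd : PySem.Set.add seen (normalize_tag t) = seen ++ [normalize_tag t] := by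
          simp only [Bool.and_eq_true, Bool.not_eq_true'] at h
          simp only [PySem.Set.add, h.2, Bool.false_eq_true, if_neg, not_false_iff]
        simp [hadd]
      · simp only [h, Bool.false_eq_true, if_neg, not_false_iff]
        rw [ih]

lemma alt_eq_goB (valid : List String) (cs : List String) :
    resolve_to_valid_tags_py_alt cs valid = goB valid (cs.map normalize_tag) := by
  unfold resolve_to_valid_tags_py_alt
  rw [List.foldl_reverse]
  induction cs with
  | nil => rfl
  | cons t cs ih =>
      simp only [List.foldr_cons, List.map_cons, goB, ih]
      by_cases hv : PySem.Set.contains valid (normalize_tag t) = true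
      · simp only [hv, if_pos, Bool.not_true, Bool.false_eq_true, if_neg, not_false_iff]
      · simp only [eq_false_of_ne_true hv, Bool.false_eq_true, if_neg,
          not_false_iff, Bool.not_false, if_pos]

-- core: A's result from state `seen` is B's result with the already-seen tags filtered out
lemma goA_eq_goB_filter (valid : List String) (ns seen : List String) :
    goA valid ns seen
      = (goB valid ns).filter (fun x => !(PySem.Set.contains seen x)) := by
  induction ns generalizing seen with
  | nil => simp [goA, goB]
  | cons nt ns ih =>
      simp only [goA, goB]
      by_cases hv : PySem.Set.contains valid nt = true
      · simp only [hv, Bool.not_true, Bool.false_eq_true, if_neg, not_false_iff]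
        by_cases hs : PySem.Set.contains seen nt = true
        · have hm : nt ∈ seen := by simpa [PySem.Set.contains] using hs
          rw [if_neg (by simp [PySem.Set.contains, hm]),
            List.filter_cons_of_neg (by simp [PySem.Set.contains, hm]), ih, List.filter_filter]
          apply List.filter_congr
          intro x _
          by_cases e : x = nt
          · subst e; simp [PySem.Set.contains, hm]
          · simp [e]
        · have hsf : PySem.Set.contains seen nt = false := by simpa using hs
          have hm : nt ∉ seen := by simpa [PySem.Set.contains] using hsf
          rw [if_pos (by simp [PySem.Set.contains, hm]),
            List.filter_cons_of_pos (by simp [PySem.Set.contains, hm]), ih,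
            List.filter_filter]
          refine congrArg (nt :: ·) ?_
          apply List.filter_congr
          intro x _
          by_cases e : x = nt
          · subst e
            simp [PySem.Set.contains]
          · simp [e, PySem.Set.contains, List.mem_append]
      · have hvf : PySem.Set.contains valid nt = false := by simpa using hv
        have hm : nt ∉ valid := by simpa [PySem.Set.contains] using hvf
        rw [if_neg (by simp [PySem.Set.contains]; exact fun h => absurd h hm),
          if_pos (by simp [PySem.Set.contains]; exact hm), ih]

-- ===== VERDICT (by name: the statement is the Claim_ definition above) =====
theorem resolve_to_valid_tags_py_spec : Claim_equal_resolve_to_valid_tags_py := by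
  intro candidates valid _
  show resolve_to_valid_tags_py candidates valid = resolve_to_valid_tags_py_alt candidates valid
  unfold resolve_to_valid_tags_py
  rw [foldlA_eq_goA valid candidates PySem.Set.empty [], List.nil_append,
    alt_eq_goB, goA_eq_goB_filter]
  simp [PySem.Set.empty, PySem.Set.contains]
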